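-- pv_equiv track=rewrite | github.com/ashley-aa511/Smart-API-security-tester | helpers.py | group_results_by_severity
-- ===== SOURCE A (Python) =====
-- from typing import Dict, List, Any
--
-- def group_results_by_severity(results: List[Dict]) -> Dict[str, List[Dict]]:
--     """Group vulnerability results by severity"""
--     grouped = {
--         "CRITICAL": [],
--         "HIGH": [],
--         "MEDIUM": [],
--         "LOW": [],
--         "INFO": []
--     }
--
--     for result in results:
--         severity = result.get("severity", "INFO")
--         if severity in grouped:
--             grouped[severity].append(result)
--
--     return grouped
-- ===== SOURCE B (Python) =====
-- def group_results_by_severity(results):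
--     """Group vulnerability results by severity: one filtering scan per fixed category."""
--     return {sev: [r for r in results if r.get("severity", "INFO") == sev]
--             for sev in ("CRITICAL", "HIGH", "MEDIUM", "LOW", "INFO")}
-- ===== Notes on version B (the rewrite author's own statement) =====
-- stated objective: idiomatic
-- what changed: Replaced the single dispatch pass that appends into pre-built mutable buckets with a dict comprehension that iterates over the five fixed categories and filters the results list once per category; unknown severities are dropped by the filter instead of a membership test.
import Mathlib
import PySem

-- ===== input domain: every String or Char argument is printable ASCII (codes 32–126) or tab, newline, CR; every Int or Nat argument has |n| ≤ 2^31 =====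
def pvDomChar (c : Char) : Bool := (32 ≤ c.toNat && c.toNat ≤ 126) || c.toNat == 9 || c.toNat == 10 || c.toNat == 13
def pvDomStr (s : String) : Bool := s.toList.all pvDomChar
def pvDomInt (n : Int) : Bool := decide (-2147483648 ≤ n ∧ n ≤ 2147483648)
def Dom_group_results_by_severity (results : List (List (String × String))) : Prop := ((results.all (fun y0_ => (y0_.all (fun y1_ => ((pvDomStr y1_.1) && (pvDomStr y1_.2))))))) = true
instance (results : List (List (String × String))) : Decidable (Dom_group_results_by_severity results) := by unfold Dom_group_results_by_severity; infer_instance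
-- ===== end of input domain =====

-- B replaces A's single dispatch pass into pre-built buckets by a per-category filter over the
-- fixed five severity names (idiomatic dict comprehension); same values, same order.


-- ===== PORT A =====
-- result.get("severity", "INFO"), first-match lookup on the association list
def pvSev (r : List (String × String)) : String :=
  (PySem.Dict.mk r).getD "severity" "INFO"

-- the loop body: if severity in grouped: grouped[severity].append(result)
def pvStep (g : PySem.Dict String (List (List (String × String))))
    (r : List (String × String)) : PySem.Dict String (List (List (String × String))) :=
  if g.contains (pvSev r) then g.modify (pvSev r) [] (fun l => l ++ [r]) else g

def group_results_by_severity (results : List (List (String × String))) :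
    List (String × List (List (String × String))) :=
  let grouped : PySem.Dict String (List (List (String × String))) :=
    PySem.Dict.ofList [("CRITICAL", []), ("HIGH", []), ("MEDIUM", []), ("LOW", []), ("INFO", [])]
  (results.foldl pvStep grouped).items

-- ===== PORT B =====
def group_results_by_severity_alt (results : List (List (String × String))) :
    List (String × List (List (String × String))) :=
  ["CRITICAL", "HIGH", "MEDIUM", "LOW", "INFO"].map
    (fun sev => (sev, results.filter (fun r => pvSev r == sev)))

-- ===== PRECONDITION & SPEC =====
def Spec_group_results_by_severity (results : List (List (String × String))) (out : List (String × List (List (String × String)))) : Prop := out = group_results_by_severity_alt results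
instance (results : List (List (String × String))) (out : List (String × List (List (String × String)))) : Decidable (Spec_group_results_by_severity results out) := by unfold Spec_group_results_by_severity; infer_instance

-- ===== CLAIM (what is proved, stated in full; the proofs are below) =====
def Claim_equal_group_results_by_severity : Prop := ∀ (results : List (List (String × String))), Dom_group_results_by_severity results → Spec_group_results_by_severity results (group_results_by_severity results)

-- ===== LEMMAS AND PROOFS =====

def pvCats : List String := ["CRITICAL", "HIGH", "MEDIUM", "LOW", "INFO"]

theorem pvStep_keys (g : PySem.Dict String (List (List (String × String))))
    (r : List (String × String)) : (pvStep g r).keys = g.keys := by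
  unfold pvStep
  split
  · rename_i h
    rw [PySem.Dict.keys_modify, PySem.Dict.keys_insert_of_contains _ _ h]
  · rfl

theorem pvFold_keys (l : List (List (String × String)))
    (g : PySem.Dict String (List (List (String × String)))) :
    (l.foldl pvStep g).keys = g.keys := by
  induction l generalizing g with
  | nil => rfl
  | cons r t ih => simp [List.foldl_cons, ih, pvStep_keys]

theorem pvFold_getD (l : List (List (String × String)))
    (g : PySem.Dict String (List (List (String × String))))
    (hk : g.keys = pvCats) (c : String) (hc : c ∈ pvCats) :
    (l.foldl pvStep g).getD c [] = g.getD c [] ++ l.filter (fun r => pvSev r == c) := by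
  induction l generalizing g with
  | nil => simp
  | cons r t ih =>
    rw [List.foldl_cons, ih (pvStep g r) (by rw [pvStep_keys, hk]), List.filter_cons]
    unfold pvStep
    by_cases hmem : (pvSev r) ∈ g.keys
    · rw [if_pos (by simpa [PySem.Dict.contains_iff_mem_keys] using hmem)]
      by_cases hce : c = pvSev r
      · subst hce
        simp [PySem.Dict.getD_modify_self]
      · have : pvSev r ≠ c := fun h => hce h.symm
        simp [PySem.Dict.getD_modify, hce, this]
    · rw [if_neg (by simpa [PySem.Dict.contains_iff_mem_keys] using hmem)]
      have hne : pvSev r ≠ c := fun h => hmem (h ▸ hk ▸ hc)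
      simp [hne]

-- ===== VERDICT (by name: the statement is the Claim_ definition above) =====
theorem group_results_by_severity_spec : Claim_equal_group_results_by_severity := by
  intro results _
  unfold Spec_group_results_by_severity group_results_by_severity group_results_by_severity_alt
  set g0 : PySem.Dict String (List (List (String × String))) :=
    PySem.Dict.ofList [("CRITICAL", []), ("HIGH", []), ("MEDIUM", []), ("LOW", []), ("INFO", [])] with hg0
  have hk : g0.keys = pvCats := by decide
  have hnd : (results.foldl pvStep g0).keys.Nodup := by
    rw [pvFold_keys, hk]; decide
  rw [PySem.Dict.items_eq_map_keys _ hnd ([] : List (List (String × String))),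
      pvFold_keys, hk]
  apply List.map_congr_left
  intro c hc
  rw [pvFold_getD results g0 hk c hc]
  have : g0.getD c [] = [] := by
    fin_cases hc <;> decide
  simp [this]
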